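-- pv_equiv track=rewrite | github.com/AmRitJain0442/ADOBE--1B | persona.py | optimize_answer_length
-- ===== SOURCE A (Python) =====
-- def optimize_answer_length(answer: str) -> str:
--     """Optimize answer length for readability while preserving key information."""
--     if len(answer) <= 300:
--         return answer
--
--     # Intelligent truncation at sentence boundaries
--     sentences = answer.split('.')
--     truncated_sentences = []
--     current_length = 0
--
--     for sentence in sentences:
--         sentence_length = len(sentence) + 1  # +1 for the period
--         if current_length + sentence_length <= 280:  # Leave room for ending
--             truncated_sentences.append(sentence)
--             current_length += sentence_length
--         else:
--             break
--
--     if truncated_sentences: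
--         result = '.'.join(truncated_sentences) + '.'
--         # Ensure it ends properly
--         if not result.endswith('.'):
--             result += '.'
--         return result
--     else:
--         # Fallback: word-based truncation
--         words = answer.split()
--         truncated = " ".join(words[:45])  # ~45 words max
--         if not truncated.endswith('.'):
--             truncated += '.'
--         return truncated
-- ===== SOURCE B (Python) =====
-- def optimize_answer_length(answer: str) -> str:
--     """Optimize answer length for readability while preserving key information."""
--     if len(answer) <= 300:
--         return answer
--
--     # Prefix-sum table over sentence lengths, then count how many prefixes fit.
--     sentences = answer.split('.')
--     prefix = []
--     total = 0
--     for s in sentences: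
--         total += len(s) + 1  # +1 for the period
--         prefix.append(total)
--     # prefix is strictly increasing, so this count equals the greedy cut point
--     count = sum(1 for t in prefix if t <= 280)
--
--     if count > 0:
--         return '.'.join(sentences[:count]) + '.'
--
--     # Fallback: word-based truncation (~45 words max)
--     truncated = " ".join(answer.split()[:45])
--     return truncated if truncated.endswith('.') else truncated + '.'
-- ===== Notes on version B (the rewrite author's own statement) =====
-- stated objective: alternative
-- what changed: B replaces A's single greedy accumulate-and-break loop (mutable sentence list plus running length) by building a prefix-sum table of sentence lengths, counting the prefixes that fit within 280 (valid since the sums are strictly increasing), and slicing the sentence list once; A's dead trailing-period guard on the sentence branch is dropped since the joined result always ends with a period.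
import Mathlib
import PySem

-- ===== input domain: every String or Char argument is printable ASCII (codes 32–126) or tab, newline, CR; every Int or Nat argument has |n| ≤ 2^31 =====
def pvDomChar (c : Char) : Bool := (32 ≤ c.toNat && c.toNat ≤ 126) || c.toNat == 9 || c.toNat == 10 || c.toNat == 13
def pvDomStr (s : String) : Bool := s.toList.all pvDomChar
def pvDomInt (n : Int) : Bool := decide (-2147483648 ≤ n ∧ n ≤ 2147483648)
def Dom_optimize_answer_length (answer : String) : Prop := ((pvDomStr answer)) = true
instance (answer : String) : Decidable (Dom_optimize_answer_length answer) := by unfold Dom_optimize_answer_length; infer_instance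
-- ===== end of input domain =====

-- B replaces A's greedy accumulate-and-break loop by a prefix-sum table + count of fitting prefixes; same results.

-- ===== PORT A =====
-- A's for-loop: append sentences while the running length stays ≤ 280, break otherwise.
def pvALoop : List String → Int → List String → List String
  | [], _, acc => acc
  | s :: rest, cur, acc =>
    let sl := PySem.Str.len s + 1
    if cur + sl ≤ 280 then pvALoop rest (cur + sl) (acc ++ [s]) else acc

def optimize_answer_length (answer : String) : String :=
  if PySem.Str.len answer ≤ 300 then answer
  else
    -- split? is some for the nonempty literal sep "."; .getD [] is exact here
    let sentences := (PySem.Str.split? answer ".").getD []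
    let truncated := pvALoop sentences 0 []
    if truncated ≠ [] then
      let result := PySem.Str.join "." truncated ++ "."
      if PySem.Str.endswith result "." = false then result ++ "." else result
    else
      let words := PySem.Str.split₀ answer
      let t := PySem.Str.join " " (PySem.List.slice words none (some 45))
      if PySem.Str.endswith t "." = false then t ++ "." else t

-- ===== PORT B =====
-- B's first loop: prefix sums of len(sentence)+1.
def pvPrefix : List String → Int → List Int
  | [], _ => []
  | s :: rest, total =>
    let t := total + (PySem.Str.len s + 1)
    t :: pvPrefix rest t

def optimize_answer_length_alt (answer : String) : String :=
  if PySem.Str.len answer ≤ 300 then answer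
  else
    let sentences := (PySem.Str.split? answer ".").getD []
    let pre := pvPrefix sentences 0
    let count := (pre.filter (fun t => decide (t ≤ 280))).length
    if 0 < count then
      PySem.Str.join "." (sentences.take count) ++ "."
    else
      let t := PySem.Str.join " " (PySem.List.slice (PySem.Str.split₀ answer) none (some 45))
      if PySem.Str.endswith t "." then t else t ++ "."

-- ===== PRECONDITION & SPEC =====
def Spec_optimize_answer_length (answer : String) (out : String) : Prop := out = optimize_answer_length_alt answer
instance (answer : String) (out : String) : Decidable (Spec_optimize_answer_length answer out) := by unfold Spec_optimize_answer_length; infer_instance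

-- ===== CLAIM (what is proved, stated in full; the proofs are below) =====
def Claim_equal_optimize_answer_length : Prop := ∀ (answer : String), Dom_optimize_answer_length answer → Spec_optimize_answer_length answer (optimize_answer_length answer)

-- ===== LEMMAS AND PROOFS =====

-- every entry of the prefix-sum list is strictly greater than the start value
theorem pvPrefix_mem_gt (ss : List String) (t x : Int) (hx : x ∈ pvPrefix ss t) : t < x := by
  induction ss generalizing t with
  | nil => simp [pvPrefix] at hx
  | cons s rest ih =>
    simp only [pvPrefix, List.mem_cons] at hx
    have hlen : (0:Int) ≤ PySem.Str.len s := by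
      simp [PySem.Str.len_eq]
    rcases hx with h | h
    · omega
    · have := ih _ h
      omega

theorem pvALoop_eq (ss : List String) (cur : Int) (acc : List String) :
    pvALoop ss cur acc = acc ++ ss.take ((pvPrefix ss cur).filter (fun t => decide (t ≤ 280))).length := by
  induction ss generalizing cur acc with
  | nil => simp [pvALoop, pvPrefix]
  | cons s rest ih =>
    simp only [pvALoop, pvPrefix, PySem.Str.len_eq]
    by_cases h : cur + ((s.toList.length : Int) + 1) ≤ 280
    · rw [if_pos h, ih, List.filter_cons]
      simp at h
      simp [h]
    · rw [if_neg h]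
      have hf : (pvPrefix rest (cur + ((s.toList.length : Int) + 1))).filter (fun t => decide (t ≤ 280)) = [] := by
        apply List.filter_eq_nil_iff.mpr
        intro x hx
        have hgt := pvPrefix_mem_gt rest _ x hx
        simp only [decide_eq_true_eq]
        omega
      rw [List.filter_cons, if_neg (by simpa using h), hf]
      simp

-- a join with "." appended always ends with "."
theorem endswith_append_dot (x : String) : PySem.Str.endswith (x ++ ".") "." = true := by
  simp only [PySem.Str.endswith_eq]
  have : (x ++ ".").toList = x.toList ++ ['.'] := by simp
  rw [this]
  exact (PySem.Chars.endswith_iff _ _).mpr ⟨x.toList, rfl⟩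

theorem optimize_answer_length_eq (answer : String) :
    optimize_answer_length answer = optimize_answer_length_alt answer := by
  unfold optimize_answer_length optimize_answer_length_alt
  by_cases h300 : PySem.Str.len answer ≤ 300
  · rw [if_pos h300, if_pos h300]
  · rw [if_neg h300, if_neg h300]
    simp only [pvALoop_eq, List.nil_append]
    set ss := (PySem.Str.split? answer ".").getD [] with hss
    set count := ((pvPrefix ss 0).filter (fun t => decide (t ≤ 280))).length with hcount
    by_cases hc : 0 < count
    · have hne : ss ≠ [] := by
        intro h
        rw [hcount, h] at hc
        simp [pvPrefix] at hc
      have htake : ss.take count ≠ [] := by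
        intro h
        rcases List.take_eq_nil_iff.mp h with h0 | h0
        · omega
        · exact hne h0
      rw [if_pos htake, if_pos hc, endswith_append_dot]
      simp
    · have hz : count = 0 := by omega
      have htake : ¬ ss.take count ≠ [] := by simp [hz]
      rw [if_neg htake, if_neg hc]
      cases he : PySem.Str.endswith (PySem.Str.join " " (PySem.List.slice (PySem.Str.split₀ answer) none (some 45))) "." <;>
        simp

-- ===== VERDICT (by name: the statement is the Claim_ definition above) =====
theorem optimize_answer_length_spec : Claim_equal_optimize_answer_length := by
  intro answer _
  unfold Spec_optimize_answer_length
  exact optimize_answer_length_eq answer
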